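-- pv_equiv track=rewrite | github.com/DrishakMohan/Assignment2 | assignment2.py | can_hike_to
-- ===== SOURCE A (Python) =====
-- from typing import List
--
-- def can_hike_to(m: List[List[int]], s: List[int], d: List[int], supplies: int) -> bool:
--     """
--     Given an elevation map m, a start cell s, a destination cell d, and
--     the an amount of supplies returns True if and only if a hiker could reach
--     d from s using the strategy dscribed in the assignment .pdf. Read the .pdf
--     carefully. Assume d is always south, east, or south-east of s. The hiker
--     never travels, north, west, nor backtracks.
--
--     Examples (note some spacing has been added for human readablity)
--     >>> m = [[1,4,3],
--              [2,3,5],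
--              [5,4,3]]
--     >>> can_hike_to(m, [0,0], [2,2], 4)
--     True
--     >>> can_hike_to(m, [0,0], [0,0], 0)
--     True
--     >>> can_hike_to(m, [0,0], [2,2], 3)
--     False
--     >>> m = [[1,  1,100],
--              [1,100,100],
--              [1,  1,  1]]
--     >>> can_hike_to([[1,  1,100],
--              [1,100,100],
--              [1,  1,  1]], [0,0], [2,2], 4)
--     False
--     >>> can_hike_to(m, [0,0], [2,2], 202)
--     True
--     """
--     if (s[0]<=len(m)-1 and s[1]<=len(m)-1 and d[0]<=len(m)-1 and d[1]<=len(m)-1):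
--
--         while s != d:
--             [x,y]=s
--
--             if s[0]==len(m)-1:
--                 supplies -= abs(m[x][y] - m[x][y+1])
--                 s=[x,y+1]
--
--             elif s[0]==d[0] :
--                 supplies -= abs(m[x][y] - m[x][y+1])
--                 s=[x,y+1]
--
--             elif s[1]==d[1] and s[0]!=d[0]:
--                 supplies -= abs(m[x][y] - m[x+1][y])
--                 s=[x+1,y]
--
--             elif abs(m[x][y]-m[x+1][y]) >= abs(m[x][y]-m[x][y+1]):
--                 supplies -= abs(m[x][y] - m[x][y+1])
--                 s=[x,y+1]
--
--             elif abs(m[x][y]-m[x][y+1]) >  abs(m[x][y]-m[x+1][y]):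
--                 supplies -= abs(m[x][y] - m[x+1][y])
--                 s=[x+1,y]
--
--         if s==d and supplies>=0:
--             return True
--         else:
--             return False
--
--     else:
--         return False
-- ===== SOURCE B (Python) =====
-- def _cost(m, x, y, d0, d1):
--     """Remaining cost of the forced greedy walk from (x, y) to (d0, d1)."""
--     if x == d0:
--         # once on the destination row the rest is a straight eastward run:
--         # its cost is a single bulk sum, no stepping needed
--         return sum(abs(m[x][j + 1] - m[x][j]) for j in range(y, d1))
--     if y == d1:
--         # on the destination column (but not row): forced south
--         return abs(m[x + 1][y] - m[x][y]) + _cost(m, x + 1, y, d0, d1)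
--     south = abs(m[x + 1][y] - m[x][y])
--     east = abs(m[x][y + 1] - m[x][y])
--     if south >= east:
--         return east + _cost(m, x, y + 1, d0, d1)
--     return south + _cost(m, x + 1, y, d0, d1)
--
--
-- def can_hike_to(m, s, d, supplies):
--     n = len(m)
--     if not (s[0] <= n - 1 and s[1] <= n - 1 and d[0] <= n - 1 and d[1] <= n - 1):
--         return False
--     return _cost(m, s[0], s[1], d[0], d[1]) <= supplies
-- ===== Notes on version B (the rewrite author's own statement) =====
-- stated objective: alternative
-- what changed: B replaces A's imperative while-loop that mutates supplies step by step with a recursive remaining-cost function split into phases: once the walk reaches the destination row the whole eastward tail is charged as one bulk range-sum instead of being stepped through, and feasibility is a single final comparison cost <= supplies.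
-- outside the precondition, e.g. on can_hike_to([[1, 2], [3, 4]], [-1, 0], [-1, 1], 5): A returns True, B returns True
import Mathlib
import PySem

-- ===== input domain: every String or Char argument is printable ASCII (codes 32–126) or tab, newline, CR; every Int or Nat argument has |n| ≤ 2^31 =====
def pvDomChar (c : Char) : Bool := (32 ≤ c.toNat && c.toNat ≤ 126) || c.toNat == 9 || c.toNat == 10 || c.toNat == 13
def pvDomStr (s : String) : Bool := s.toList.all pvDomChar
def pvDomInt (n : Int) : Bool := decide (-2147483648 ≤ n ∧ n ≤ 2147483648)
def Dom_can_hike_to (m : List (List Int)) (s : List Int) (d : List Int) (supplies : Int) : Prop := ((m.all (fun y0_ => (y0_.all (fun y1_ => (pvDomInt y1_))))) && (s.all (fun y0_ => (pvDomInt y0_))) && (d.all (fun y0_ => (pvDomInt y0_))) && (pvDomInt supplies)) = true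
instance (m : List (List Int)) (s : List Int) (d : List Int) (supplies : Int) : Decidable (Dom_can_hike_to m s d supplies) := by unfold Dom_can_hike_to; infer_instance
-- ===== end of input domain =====

-- B recasts A's supply-mutating while-loop as a recursive remaining-cost function with a
-- bulk range-sum for the final eastward run; same return value on Pre_.

-- ===== PORT A =====
-- m[x][y]: inside Pre_ every access is in range; the getD defaults are never hit there
-- (Python raises IndexError on the inputs where they would be; those are outside Pre_).
def pvGetA (m : List (List Int)) (x y : Int) : Int :=
  (((PySem.List.pyGet? m x).getD []) |> (fun r => PySem.List.pyGet? r y)).getD 0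

-- A's while loop, fuelled (the Python loop either exits via s == d or raises; inside
-- Pre_ it exits within the fuel supplied by can_hike_to; fuel exhaustion returns false).
def canHikeLoopA (m : List (List Int)) (N d0 d1 : Int) : Nat → Int → Int → Int → Bool
  | 0, _, _, _ => false
  | fuel+1, x, y, sup =>
    if x = d0 ∧ y = d1 then decide (0 ≤ sup)
    else if x = N - 1 then
      canHikeLoopA m N d0 d1 fuel x (y+1) (sup - |pvGetA m x y - pvGetA m x (y+1)|)
    else if x = d0 then
      canHikeLoopA m N d0 d1 fuel x (y+1) (sup - |pvGetA m x y - pvGetA m x (y+1)|)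
    else if y = d1 ∧ x ≠ d0 then
      canHikeLoopA m N d0 d1 fuel (x+1) y (sup - |pvGetA m x y - pvGetA m (x+1) y|)
    else if |pvGetA m x y - pvGetA m (x+1) y| ≥ |pvGetA m x y - pvGetA m x (y+1)| then
      canHikeLoopA m N d0 d1 fuel x (y+1) (sup - |pvGetA m x y - pvGetA m x (y+1)|)
    else if |pvGetA m x y - pvGetA m x (y+1)| > |pvGetA m x y - pvGetA m (x+1) y| then
      canHikeLoopA m N d0 d1 fuel (x+1) y (sup - |pvGetA m x y - pvGetA m (x+1) y|)
    else -- unreachable (the previous two conditions are exhaustive); Python would loop forever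
      canHikeLoopA m N d0 d1 fuel x y sup

def can_hike_to (m : List (List Int)) (s : List Int) (d : List Int) (supplies : Int) : Bool :=
  let N : Int := (m.length : Int)
  let s0 := (PySem.List.pyGet? s 0).getD 0   -- Python raises on a missing index: outside Pre_
  let s1 := (PySem.List.pyGet? s 1).getD 0
  let d0 := (PySem.List.pyGet? d 0).getD 0
  let d1 := (PySem.List.pyGet? d 1).getD 0
  if s0 ≤ N - 1 ∧ s1 ≤ N - 1 ∧ d0 ≤ N - 1 ∧ d1 ≤ N - 1 then
    canHikeLoopA m N d0 d1 (2 * m.length + 2) s0 s1 supplies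
  else false

-- ===== PORT B =====
def pvGetB (m : List (List Int)) (x y : Int) : Int :=
  (((PySem.List.pyGet? m x).getD []) |> (fun r => PySem.List.pyGet? r y)).getD 0

-- Source B: sum(abs(m[x][j+1] - m[x][j]) for j in range(y, d1))
def pvTailB (m : List (List Int)) (x y d1 : Int) : Int :=
  ((PySem.List.pyRange y d1 1).map (fun j => |pvGetB m x (j+1) - pvGetB m x j|)).sum

-- Source B's _cost, fuelled (Python's recursion is unbounded; inside Pre_ its depth is
-- bounded by the fuel can_hike_to_alt supplies, so the 0 on exhaustion is never reached).
def pvCostB (m : List (List Int)) (d0 d1 : Int) : Nat → Int → Int → Int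
  | 0, _, _ => 0
  | fuel+1, x, y =>
    if x = d0 then pvTailB m x y d1
    else if y = d1 then |pvGetB m (x+1) y - pvGetB m x y| + pvCostB m d0 d1 fuel (x+1) y
    else
      let south := |pvGetB m (x+1) y - pvGetB m x y|
      let east := |pvGetB m x (y+1) - pvGetB m x y|
      if south ≥ east then east + pvCostB m d0 d1 fuel x (y+1)
      else south + pvCostB m d0 d1 fuel (x+1) y

def can_hike_to_alt (m : List (List Int)) (s : List Int) (d : List Int) (supplies : Int) : Bool :=
  let N : Int := (m.length : Int)
  let s0 := (PySem.List.pyGet? s 0).getD 0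
  let s1 := (PySem.List.pyGet? s 1).getD 0
  let d0 := (PySem.List.pyGet? d 0).getD 0
  let d1 := (PySem.List.pyGet? d 1).getD 0
  if s0 ≤ N - 1 ∧ s1 ≤ N - 1 ∧ d0 ≤ N - 1 ∧ d1 ≤ N - 1 then
    decide (pvCostB m d0 d1 (2 * m.length + 2) s0 s1 ≤ supplies)
  else false

-- ===== PRECONDITION & SPEC =====
-- Pre_ excludes exactly the inputs on which Python A raises (coordinate lists shorter than
-- the guard's accesses, walks that step off the grid because d is not south-east of s, rows
-- shorter than the grid height); the few such ill-shaped inputs on which Python's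
-- negative-index wraparound or a longer ragged row still lets A return a value are excluded
-- with them, because any value there is an accident of wraparound (B happens to agree).
def Pre_can_hike_to (m : List (List Int)) (s : List Int) (d : List Int) (supplies : Int) : Prop :=
  let N : Int := (m.length : Int)
  let s0 := (PySem.List.pyGet? s 0).getD 0
  let s1 := (PySem.List.pyGet? s 1).getD 0
  let d0 := (PySem.List.pyGet? d 0).getD 0
  let d1 := (PySem.List.pyGet? d 1).getD 0
  -- the bounds guard fails under Python's short-circuit evaluation: A returns False at once
  ((1 ≤ s.length ∧ N - 1 < s0)
    ∨ (2 ≤ s.length ∧ s0 ≤ N - 1 ∧ N - 1 < s1)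
    ∨ (2 ≤ s.length ∧ 1 ≤ d.length ∧ s0 ≤ N - 1 ∧ s1 ≤ N - 1 ∧ N - 1 < d0)
    ∨ (2 ≤ s.length ∧ 2 ≤ d.length ∧ s0 ≤ N - 1 ∧ s1 ≤ N - 1 ∧ d0 ≤ N - 1 ∧ N - 1 < d1))
  -- or s == d already (the loop never runs)
  ∨ (s = d ∧ 2 ≤ s.length ∧ s0 ≤ N - 1 ∧ s1 ≤ N - 1)
  -- or the documented shape: d south-east of s, in bounds, rows long enough
  ∨ (s.length = 2 ∧ d.length = 2 ∧ (∀ r ∈ m, m.length ≤ r.length)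
      ∧ 0 ≤ s0 ∧ 0 ≤ s1 ∧ s0 ≤ d0 ∧ s1 ≤ d1 ∧ d0 ≤ N - 1 ∧ d1 ≤ N - 1)

instance (m : List (List Int)) (s : List Int) (d : List Int) (supplies : Int) : Decidable (Pre_can_hike_to m s d supplies) := by unfold Pre_can_hike_to; infer_instance

def pvWitness_can_hike_to : List (List Int) × List Int × List Int × Int :=
  ([[1,4,3],[2,3,5],[5,4,3]], [0,0], [2,2], 4)

def Spec_can_hike_to (m : List (List Int)) (s : List Int) (d : List Int) (supplies : Int) (out : Bool) : Prop := out = can_hike_to_alt m s d supplies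
instance (m : List (List Int)) (s : List Int) (d : List Int) (supplies : Int) (out : Bool) : Decidable (Spec_can_hike_to m s d supplies out) := by unfold Spec_can_hike_to; infer_instance

-- ===== CLAIM (what is proved, stated in full; the proofs are below) =====
def Claim_equal_can_hike_to : Prop := ∀ (m : List (List Int)) (s : List Int) (d : List Int) (supplies : Int), Dom_can_hike_to m s d supplies → Pre_can_hike_to m s d supplies → Spec_can_hike_to m s d supplies (can_hike_to m s d supplies)

-- ===== LEMMAS AND PROOFS =====

theorem pvGet_eq (m : List (List Int)) (x y : Int) : pvGetA m x y = pvGetB m x y := rfl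

-- A's eastward end-game (x = d0) computes exactly B's bulk tail sum
theorem tail_eq (m : List (List Int)) (N d0 d1 : Int) :
    ∀ (fuel : Nat) (y sup : Int), y ≤ d1 → d1 - y < (fuel : Int) →
      canHikeLoopA m N d0 d1 fuel d0 y sup = decide (pvTailB m d0 y d1 ≤ sup) := by
  intro fuel
  induction fuel with
  | zero => intro y sup h1 h2; omega
  | succ n ih =>
    intro y sup h1 h2
    by_cases hy : y = d1
    · subst hy
      rw [canHikeLoopA, if_pos ⟨rfl, rfl⟩]
      have h0 : pvTailB m d0 y y = 0 := by simp [pvTailB]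
      rw [h0]
    · have hylt : y < d1 := by omega
      have hstep : canHikeLoopA m N d0 d1 (n+1) d0 y sup
          = canHikeLoopA m N d0 d1 n d0 (y+1) (sup - |pvGetA m d0 y - pvGetA m d0 (y+1)|) := by
        by_cases hN : d0 = N - 1
        · rw [canHikeLoopA, if_neg (by tauto), if_pos hN]
        · rw [canHikeLoopA, if_neg (by tauto), if_neg hN, if_pos rfl]
      rw [hstep, ih (y+1) _ (by omega) (by omega)]
      have htail : pvTailB m d0 y d1
          = |pvGetB m d0 (y+1) - pvGetB m d0 y| + pvTailB m d0 (y+1) d1 := by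
        simp [pvTailB, PySem.List.pyRange_one_cons hylt]
      rw [htail, decide_eq_decide, ← pvGet_eq, ← pvGet_eq, abs_sub_comm (pvGetA m d0 (y+1))]
      omega

-- the core correspondence: A's fused walk equals B's recursive remaining cost
theorem cost_eq (m : List (List Int)) (N d0 d1 : Int) (hd : d0 ≤ N - 1) :
    ∀ (fuel : Nat) (x y sup : Int), x ≤ d0 → y ≤ d1 →
      (d0 - x) + (d1 - y) < (fuel : Int) →
      canHikeLoopA m N d0 d1 fuel x y sup = decide (pvCostB m d0 d1 fuel x y ≤ sup) := by
  intro fuel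
  induction fuel with
  | zero => intro x y sup h1 h2 h3; omega
  | succ n ih =>
    intro x y sup h1 h2 h3
    by_cases hx : x = d0
    · subst hx
      rw [pvCostB, if_pos rfl]
      exact tail_eq m N x d1 (n+1) y sup h2 (by omega)
    · have hxlt : x < d0 := by omega
      have hxN : x ≠ N - 1 := by omega
      by_cases hy : y = d1
      · have hA : canHikeLoopA m N d0 d1 (n+1) x y sup
            = canHikeLoopA m N d0 d1 n (x+1) y (sup - |pvGetA m x y - pvGetA m (x+1) y|) := by
          rw [canHikeLoopA, if_neg (by tauto), if_neg hxN, if_neg hx, if_pos ⟨hy, hx⟩]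
        rw [hA, ih (x+1) y _ (by omega) h2 (by omega)]
        rw [pvCostB, if_neg hx, if_pos hy, decide_eq_decide,
          ← pvGet_eq, ← pvGet_eq, abs_sub_comm (pvGetA m (x+1) y)]
        omega
      · by_cases hc : |pvGetA m x y - pvGetA m (x+1) y| ≥ |pvGetA m x y - pvGetA m x (y+1)|
        · have hA : canHikeLoopA m N d0 d1 (n+1) x y sup
              = canHikeLoopA m N d0 d1 n x (y+1) (sup - |pvGetA m x y - pvGetA m x (y+1)|) := by
            rw [canHikeLoopA, if_neg (by tauto), if_neg hxN, if_neg hx, if_neg (by tauto), if_pos hc]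
          rw [hA, ih x (y+1) _ h1 (by omega) (by omega)]
          have hB : pvCostB m d0 d1 (n+1) x y
              = |pvGetB m x (y+1) - pvGetB m x y| + pvCostB m d0 d1 n x (y+1) := by
            simp only [pvCostB]
            rw [if_neg hx, if_neg hy,
              if_pos (show |pvGetB m (x+1) y - pvGetB m x y| ≥ |pvGetB m x (y+1) - pvGetB m x y| by
                rw [abs_sub_comm (pvGetB m (x+1) y), abs_sub_comm (pvGetB m x (y+1))]; exact hc)]
          rw [hB, decide_eq_decide, ← pvGet_eq, ← pvGet_eq, abs_sub_comm (pvGetA m x (y+1))]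
          omega
        · have hA : canHikeLoopA m N d0 d1 (n+1) x y sup
              = canHikeLoopA m N d0 d1 n (x+1) y (sup - |pvGetA m x y - pvGetA m (x+1) y|) := by
            rw [canHikeLoopA, if_neg (by tauto), if_neg hxN, if_neg hx, if_neg (by tauto),
              if_neg hc, if_pos (by omega)]
          rw [hA, ih (x+1) y _ (by omega) h2 (by omega)]
          have hB : pvCostB m d0 d1 (n+1) x y
              = |pvGetB m (x+1) y - pvGetB m x y| + pvCostB m d0 d1 n (x+1) y := by
            simp only [pvCostB]
            rw [if_neg hx, if_neg hy,
              if_neg (show ¬ |pvGetB m (x+1) y - pvGetB m x y| ≥ |pvGetB m x (y+1) - pvGetB m x y| by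
                rw [abs_sub_comm (pvGetB m (x+1) y), abs_sub_comm (pvGetB m x (y+1))]; exact hc)]
          rw [hB, decide_eq_decide, ← pvGet_eq, ← pvGet_eq, abs_sub_comm (pvGetA m (x+1) y)]
          omega

-- ===== VERDICT (by name: the statement is the Claim_ definition above) =====
theorem can_hike_to_spec : Claim_equal_can_hike_to := by
  intro m s d supplies _ hpre
  unfold Spec_can_hike_to can_hike_to can_hike_to_alt
  simp only []
  by_cases hg : (PySem.List.pyGet? s 0).getD 0 ≤ (m.length : Int) - 1
      ∧ (PySem.List.pyGet? s 1).getD 0 ≤ (m.length : Int) - 1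
      ∧ (PySem.List.pyGet? d 0).getD 0 ≤ (m.length : Int) - 1
      ∧ (PySem.List.pyGet? d 1).getD 0 ≤ (m.length : Int) - 1
  · rw [if_pos hg, if_pos hg]
    obtain ⟨hg1, hg2, hg3, hg4⟩ := hg
    unfold Pre_can_hike_to at hpre
    simp only [] at hpre
    rcases hpre with h | h | h
    · exfalso
      rcases h with ⟨_, h⟩ | ⟨_, _, h⟩ | ⟨_, _, _, _, h⟩ | ⟨_, _, _, _, _, h⟩ <;> omega
    · obtain ⟨hsd, -, -, -⟩ := h
      have e0 : (PySem.List.pyGet? s 0).getD 0 = (PySem.List.pyGet? d 0).getD 0 := by rw [hsd]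
      have e1 : (PySem.List.pyGet? s 1).getD 0 = (PySem.List.pyGet? d 1).getD 0 := by rw [hsd]
      exact cost_eq m _ _ _ hg3 _ _ _ _ (by omega) (by omega) (by omega)
    · obtain ⟨-, -, -, h4, h5, h6, h7, h8, h9⟩ := h
      exact cost_eq m _ _ _ hg3 _ _ _ _ h6 h7 (by omega)
  · rw [if_neg hg, if_neg hg]
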